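-- pv_equiv track=rewrite | github.com/Girouetten21/hack_python_2 | hack_1.py | fn_hack_1
-- ===== SOURCE A (Python) =====
-- def fn_hack_1(s):
--     result = s
--     array = []
--
--     txt_array = [result[i:i+3] for i in range(0, len(result), 3)]
--
--     for txt in txt_array:
--         if len(txt) == 3:
--             content = f"{txt[0]}{txt[1].upper()}{txt[2]}"
--             array.append(content)
--         else:
--             array.append(txt)
--
--     result = "".join(array)
--     return result
-- ===== SOURCE B (Python) =====
-- def fn_hack_1(s):
--     n = len(s)
--     return "".join(
--         c.upper() if i % 3 == 1 and i + 1 < n else c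
--         for i, c in enumerate(s)
--     )
-- ===== Notes on version B (the rewrite author's own statement) =====
-- stated objective: simpler
-- what changed: B drops A's chunk-list construction (slice into 3-char pieces, rebuild each complete piece, join) and instead does one enumerate pass over the characters, uppercasing position i exactly when i % 3 == 1 and i + 1 < len(s).
import Mathlib
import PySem

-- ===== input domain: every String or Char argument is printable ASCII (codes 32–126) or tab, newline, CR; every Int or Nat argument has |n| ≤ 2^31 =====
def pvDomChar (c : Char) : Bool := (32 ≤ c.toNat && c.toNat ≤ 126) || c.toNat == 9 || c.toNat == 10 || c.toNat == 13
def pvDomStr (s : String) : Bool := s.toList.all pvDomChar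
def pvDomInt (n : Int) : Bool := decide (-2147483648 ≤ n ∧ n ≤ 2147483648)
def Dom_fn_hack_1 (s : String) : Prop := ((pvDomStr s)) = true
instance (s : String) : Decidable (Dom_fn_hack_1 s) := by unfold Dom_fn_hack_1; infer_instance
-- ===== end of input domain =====

-- B replaces A's chunk-list construction (slice into 3-char pieces, rebuild each complete
-- piece with its middle char uppercased, join) by a single enumerate pass that uppercases
-- the char at index i exactly when i % 3 == 1 and i + 1 < len(s); objective: simpler.

-- ===== PORT A =====
-- A, transliterated over List Char (a Python str is its list of characters; "".join = flatten
-- in this representation). txt[k].upper() on a single ASCII char is Chars.upperChar.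
def fn_hack_1 (s : String) : String :=
  let result := s.toList
  let txt_array :=
    (PySem.List.pyRange 0 (result.length : Int) 3).map
      (fun i => PySem.List.slice result (some i) (some (i + 3)))
  let array :=
    txt_array.foldl
      (fun acc txt =>
        if txt.length == 3 then
          acc ++ [[PySem.List.pyGetD txt 0 ' ',
                   PySem.Chars.upperChar (PySem.List.pyGetD txt 1 ' '),
                   PySem.List.pyGetD txt 2 ' ']]
        else
          acc ++ [txt]) []
  String.mk array.flatten

-- ===== PORT B =====
-- B: one pass with enumerate; uppercase position i iff i % 3 == 1 and i + 1 < n.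
def fn_hack_1_alt (s : String) : String :=
  let cs := s.toList
  let n : Int := cs.length
  String.mk ((PySem.List.enumerate cs).map
    (fun ic => if ic.1 % 3 = 1 ∧ ic.1 + 1 < n then PySem.Chars.upperChar ic.2 else ic.2))

-- ===== PRECONDITION & SPEC =====
def Spec_fn_hack_1 (s : String) (out : String) : Prop := out = fn_hack_1_alt s
instance (s : String) (out : String) : Decidable (Spec_fn_hack_1 s out) := by unfold Spec_fn_hack_1; infer_instance

-- ===== CLAIM (what is proved, stated in full; the proofs are below) =====
def Claim_equal_fn_hack_1 : Prop := ∀ (s : String), Dom_fn_hack_1 s → Spec_fn_hack_1 s (fn_hack_1 s)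

-- ===== LEMMAS AND PROOFS =====

-- common normal form: uppercase the middle char of each complete 3-char group
def chunkSpec : List Char → List Char
  | a :: b :: c :: rest => a :: PySem.Chars.upperChar b :: c :: chunkSpec rest
  | rest => rest

-- A's chunk list, rewritten with Nat indices
lemma txtA_eq (cs : List Char) :
    (PySem.List.pyRange 0 (cs.length : Int) 3).map
      (fun i => PySem.List.slice cs (some i) (some (i + 3)))
    = (List.range (((cs.length : Int) + 2) / 3).toNat).map
        (fun k => (cs.drop (3 * k)).take 3) := by
  rw [PySem.List.pyRange_of_pos 0 _ (by norm_num), List.map_map]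
  have hcnt : (if (0:Int) < (cs.length : Int)
      then (((cs.length : Int) - 0 + 3 - 1) / 3).toNat else 0)
      = (((cs.length : Int) + 2) / 3).toNat := by
    split_ifs with h
    · ring_nf
    · have h0 : (cs.length : Int) = 0 := by omega
      simp [h0]
  rw [hcnt]
  apply List.map_congr_left
  intro k _
  show PySem.List.slice cs (some (0 + 3 * (k : Int))) (some (0 + 3 * (k : Int) + 3))
      = (cs.drop (3 * k)).take 3
  have h1 : (0 + 3 * (k : Int)) = ((3 * k : Nat) : Int) := by push_cast; ring
  have h2 : (0 + 3 * (k : Int) + 3) = ((3 * k : Nat) : Int) + ((3 : Nat) : Int) := by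
    push_cast; ring
  rw [h1]
  exact PySem.List.slice_natCast_add cs (3 * k) 3

-- A's loop-and-join equals chunkSpec
lemma A_core (cs : List Char) :
    (((List.range (((cs.length : Int) + 2) / 3).toNat).map
        (fun k => (cs.drop (3 * k)).take 3)).map
      (fun txt => if txt.length == 3 then
          [PySem.List.pyGetD txt 0 ' ',
           PySem.Chars.upperChar (PySem.List.pyGetD txt 1 ' '),
           PySem.List.pyGetD txt 2 ' ']
        else txt)).flatten = chunkSpec cs := by
  induction cs using chunkSpec.induct with
  | case1 a b c rest ih =>
    have hlen : ((((a :: b :: c :: rest).length : Int) + 2) / 3).toNat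
        = (((rest.length : Int) + 2) / 3).toNat + 1 := by
      simp only [List.length_cons]
      push_cast
      omega
    rw [hlen, List.range_succ_eq_map]
    simp only [List.map_cons, List.map_map, List.flatten_cons]
    have htail : List.map
        ((fun txt => if txt.length == 3 then
            [PySem.List.pyGetD txt 0 ' ',
             PySem.Chars.upperChar (PySem.List.pyGetD txt 1 ' '),
             PySem.List.pyGetD txt 2 ' ']
          else txt) ∘ (fun k => ((a :: b :: c :: rest).drop (3 * k)).take 3) ∘ Nat.succ)
        (List.range (((rest.length : Int) + 2) / 3).toNat)
        = List.map
        ((fun txt => if txt.length == 3 then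
            [PySem.List.pyGetD txt 0 ' ',
             PySem.Chars.upperChar (PySem.List.pyGetD txt 1 ' '),
             PySem.List.pyGetD txt 2 ' ']
          else txt) ∘ (fun k => (rest.drop (3 * k)).take 3))
        (List.range (((rest.length : Int) + 2) / 3).toNat) := by
      apply List.map_congr_left
      intro k _
      simp only [Function.comp_apply]
      congr 1
    rw [htail, ← List.map_map, ih]
    simp [chunkSpec, PySem.List.pyGetD]
  | case2 rest hne =>
    rcases rest with _ | ⟨a, _ | ⟨b, _ | ⟨c, t⟩⟩⟩
    · simp [chunkSpec]
    · norm_num [chunkSpec, PySem.List.pyGetD, List.range_succ]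
    · norm_num [chunkSpec, PySem.List.pyGetD, List.range_succ]
    · exact (hne a b c t rfl).elim

-- B's enumerate pass equals chunkSpec, for any start offset divisible by 3
lemma B_core (cs : List Char) : ∀ (k : Int), 0 ≤ k → k % 3 = 0 →
    (PySem.List.enumerate cs k).map
      (fun ic => if ic.1 % 3 = 1 ∧ ic.1 + 1 < k + (cs.length : Int)
        then PySem.Chars.upperChar ic.2 else ic.2)
    = chunkSpec cs := by
  induction cs using chunkSpec.induct with
  | case1 a b c rest ih =>
    intro k hk h3
    rw [PySem.List.enumerate_cons, PySem.List.enumerate_cons, PySem.List.enumerate_cons]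
    simp only [List.map_cons, List.length_cons]
    have h1 : ¬ (k % 3 = 1 ∧ k + 1 < k + ((rest.length + 1 + 1 + 1 : Nat) : Int)) := by
      omega
    have h2 : (k + 1) % 3 = 1 ∧ (k + 1) + 1 < k + ((rest.length + 1 + 1 + 1 : Nat) : Int) := by
      constructor
      · omega
      · push_cast; omega
    have h3' : ¬ ((k + 1 + 1) % 3 = 1 ∧ (k + 1 + 1) + 1
        < k + ((rest.length + 1 + 1 + 1 : Nat) : Int)) := by
      intro h; omega
    rw [if_neg h1, if_pos h2, if_neg h3']
    have hn : k + ((rest.length + 1 + 1 + 1 : Nat) : Int)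
        = (k + 1 + 1 + 1) + (rest.length : Int) := by push_cast; ring
    simp only [hn]
    rw [ih (k + 1 + 1 + 1) (by omega) (by omega)]
    rfl
  | case2 rest hne =>
    rcases rest with _ | ⟨a, _ | ⟨b, _ | ⟨c, t⟩⟩⟩
    · intro k _ _
      simp [chunkSpec]
    · intro k hk h3
      rw [PySem.List.enumerate_cons]
      simp only [PySem.List.enumerate_nil, List.map_cons, List.map_nil, List.length_cons,
        List.length_nil]
      have h1 : ¬ (k % 3 = 1 ∧ k + 1 < k + ((0 + 1 : Nat) : Int)) := by
        intro h; omega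
      rw [if_neg h1]
      rfl
    · intro k hk h3
      rw [PySem.List.enumerate_cons, PySem.List.enumerate_cons]
      simp only [PySem.List.enumerate_nil, List.map_cons, List.map_nil, List.length_cons,
        List.length_nil]
      have h1 : ¬ (k % 3 = 1 ∧ k + 1 < k + ((0 + 1 + 1 : Nat) : Int)) := by
        intro h; omega
      have h2 : ¬ ((k + 1) % 3 = 1 ∧ (k + 1) + 1 < k + ((0 + 1 + 1 : Nat) : Int)) := by
        intro h; omega
      rw [if_neg h1, if_neg h2]
      rfl
    · exact (hne a b c t rfl).elim

-- ===== VERDICT (by name: the statement is the Claim_ definition above) =====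
theorem fn_hack_1_spec : Claim_equal_fn_hack_1 := by
  intro s _
  show fn_hack_1 s = fn_hack_1_alt s
  unfold fn_hack_1 fn_hack_1_alt
  simp only
  rw [txtA_eq]
  have hfun : (fun (acc : List (List Char)) txt =>
      if txt.length == 3 then
        acc ++ [[PySem.List.pyGetD txt 0 ' ',
                 PySem.Chars.upperChar (PySem.List.pyGetD txt 1 ' '),
                 PySem.List.pyGetD txt 2 ' ']]
      else acc ++ [txt])
      = (fun acc txt => acc ++ [(fun txt => if txt.length == 3 then
          [PySem.List.pyGetD txt 0 ' ',
           PySem.Chars.upperChar (PySem.List.pyGetD txt 1 ' '),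
           PySem.List.pyGetD txt 2 ' '] else txt) txt]) := by
    funext acc txt
    by_cases h : (txt.length == 3) = true <;> simp [h]
  rw [hfun, PySem.List.foldl_append_singleton_eq_map, List.nil_append, A_core]
  have := B_core s.toList 0 le_rfl rfl
  simp only [zero_add] at this
  rw [this]
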